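-- pv_equiv track=rewrite | github.com/vincentx1908/pythondailychallenge | 20260402/CapitalisedFibonacci.py | capitalize_fibonacci
-- ===== SOURCE A (Python) =====
-- def capitalize_fibonacci(s):
--     fibo = [0, 1]
--     s = s.lower()
--     while fibo[-1] < len(s):
--         fibo.append(fibo[-1] + fibo[-2])
--
--     fibo_set= set(fibo)
--
--     result = ""
--     for i in range(len(s)):
--         if s[i].isalpha() and i in fibo_set:
--             result += s[i].upper()
--         else:
--             result += s[i]
--
--     return result
-- ===== SOURCE B (Python) =====
-- def capitalize_fibonacci(s):
--     chars = list(s.lower())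
--     n = len(chars)
--     a, b = 0, 1
--     while a < n:
--         if chars[a].isalpha():
--             chars[a] = chars[a].upper()
--         a, b = b, a + b
--     return "".join(chars)
-- ===== Notes on version B (the rewrite author's own statement) =====
-- stated objective: faster
-- what changed: A builds the Fibonacci list/set and scans every position with an isalpha+set-membership test while concatenating a string; B lowercases once into a char list and touches only the O(log n) Fibonacci indices, uppercasing in place, then joins.
import Mathlib
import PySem

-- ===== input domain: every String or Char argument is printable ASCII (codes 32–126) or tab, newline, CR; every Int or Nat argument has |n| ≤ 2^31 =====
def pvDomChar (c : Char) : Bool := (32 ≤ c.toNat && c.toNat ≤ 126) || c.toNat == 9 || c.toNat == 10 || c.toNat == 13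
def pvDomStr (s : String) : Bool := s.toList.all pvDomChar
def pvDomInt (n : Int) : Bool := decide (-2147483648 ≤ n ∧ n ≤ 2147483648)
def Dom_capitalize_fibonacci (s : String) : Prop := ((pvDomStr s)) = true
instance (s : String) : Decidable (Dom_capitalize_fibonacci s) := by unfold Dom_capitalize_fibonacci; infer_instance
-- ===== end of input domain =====

-- B lowercases once into a char list and uppercases, in place, only the Fibonacci indices,
-- instead of A's scan of every position with a Fibonacci-set membership test (objective: faster; return value proved equal).


-- ===== PORT A =====
-- A's while loop 'while fibo[-1] < len(s): fibo.append(fibo[-1] + fibo[-2])', carried out on the whole list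
-- exactly as in the Python; fuel = len(s)+1 iterations suffice: when the fuel runs out the loop
-- condition is already false (the invariant inside mem_genA_iff_genB below covers this).
def fibLoopA (fuel : Nat) (n : Int) (fibo : List Int) : List Int :=
  match fuel with
  | 0 => fibo
  | f + 1 =>
      if PySem.List.pyGetD fibo (-1) 0 < n then
        fibLoopA f n (fibo ++ [PySem.List.pyGetD fibo (-1) 0 + PySem.List.pyGetD fibo (-2) 0])
      else fibo
def capitalize_fibonacci (s : String) : String :=
  let sl : List Char := PySem.Chars.lower s.toList
  let n : Int := sl.length
  let fibo : List Int := fibLoopA (sl.length + 1) n [0, 1]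
  let fiboSet : PySem.Set Int := PySem.Set.ofList fibo
  String.ofList ((PySem.List.pyRange 0 n 1).foldl
    (fun acc i =>
      if PySem.Chars.isalpha (PySem.List.pyGetD sl i ' ') && PySem.Set.contains fiboSet i
      then acc ++ [PySem.Chars.upperChar (PySem.List.pyGetD sl i ' ')]
      else acc ++ [PySem.List.pyGetD sl i ' ']) [])
def bloopB (fuel : Nat) (n : Int) (a b : Int) (chars : List Char) : List Char :=
  match fuel with
  | 0 => chars
  | f + 1 =>
      if a < n then
        bloopB f n b (a + b)
          (if PySem.Chars.isalpha (PySem.List.pyGetD chars a ' ')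
           then PySem.List.pySetD chars a (PySem.Chars.upperChar (PySem.List.pyGetD chars a ' '))
           else chars)
      else chars
def capitalize_fibonacci_alt (s : String) : String :=
  let chars : List Char := PySem.Chars.lower s.toList
  let n : Int := chars.length
  String.ofList (bloopB (chars.length + 1) n 0 1 chars)

-- ===== PRECONDITION & SPEC =====
def Spec_capitalize_fibonacci (s : String) (out : String) : Prop := out = capitalize_fibonacci_alt s
instance (s : String) (out : String) : Decidable (Spec_capitalize_fibonacci s out) := by unfold Spec_capitalize_fibonacci; infer_instance

-- ===== CLAIM (what is proved, stated in full; the proofs are below) =====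
def Claim_equal_capitalize_fibonacci : Prop := ∀ (s : String), Dom_capitalize_fibonacci s → Spec_capitalize_fibonacci s (capitalize_fibonacci s)

-- ===== LEMMAS AND PROOFS =====

-- the pure Fibonacci value streams of the two loops (proof-side abstractions)
def genA (fuel : Nat) (n x y : Int) : List Int :=
  match fuel with
  | 0 => []
  | f + 1 => if y < n then (x + y) :: genA f n y (x + y) else []
def genB (fuel : Nat) (n a b : Int) : List Int :=
  match fuel with
  | 0 => []
  | f + 1 => if a < n then a :: genB f n b (a + b) else []

theorem pyGetD_append_pair_neg_one (l : List Int) (x y : Int) : PySem.List.pyGetD (l ++ [x, y]) (-1) 0 = y := by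
  have : l ++ [x, y] = (l ++ [x]) ++ [y] := by simp
  rw [this, PySem.List.pyGetD_neg_one_append_singleton]

theorem pyGetD_append_pair_neg_two (l : List Int) (x y : Int) : PySem.List.pyGetD (l ++ [x, y]) (-2) 0 = x := by
  rw [PySem.List.pyGetD_neg_ofNat (l ++ [x, y]) 2 0 (by omega) (by simp)]
  simp [List.getElem_append_right]

theorem fibLoopA_eq_genA (fuel : Nat) (n : Int) :
    ∀ (l : List Int) (x y : Int),
      fibLoopA fuel n (l ++ [x, y]) = (l ++ [x, y]) ++ genA fuel n x y := by
  induction fuel with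
  | zero => intro l x y; simp [fibLoopA, genA]
  | succ f ih =>
    intro l x y
    rw [fibLoopA, genA, pyGetD_append_pair_neg_one, pyGetD_append_pair_neg_two]
    by_cases h : y < n
    · simp only [if_pos h]
      have e : (l ++ [x, y]) ++ [y + x] = (l ++ [x]) ++ [y, x + y] := by
        simp [Int.add_comm]
      rw [e, ih (l ++ [x]) y (x + y)]
      simp
    · simp [h]

theorem genB_of_ge (fuel : Nat) (n a b : Int) (h : ¬ a < n) : genB fuel n a b = [] := by
  cases fuel <;> simp [genB, h]

theorem mem_genA_iff_genB (fuel : Nat) (n : Int) :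
    ∀ x y i : Int, 0 ≤ x → x ≤ y → 1 ≤ y →
      n ≤ x + fuel → n + 1 ≤ y + fuel → n + 2 ≤ x + y + fuel →
      i < n → ((i = x ∨ i = y ∨ i ∈ genA fuel n x y) ↔ i ∈ genB fuel n x y) := by
  induction fuel with
  | zero =>
    intro x y i hx hxy hy h1 h2 h3 hi
    simp only [genA, genB, List.not_mem_nil, or_false]
    constructor
    · rintro (rfl | rfl) <;> omega
    · intro h; exact absurd h (by simp)
  | succ f ih =>
    intro x y i hx hxy hy h1 h2 h3 hi
    by_cases hxn : x < n
    · rw [genB, if_pos hxn]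
      by_cases hyn : y < n
      · rw [genA, if_pos hyn]
        have := ih y (x + y) i (by omega) (by omega) (by omega) (by omega) (by omega) (by omega) hi
        simp only [List.mem_cons] at *
        tauto
      · rw [genA, if_neg hyn, genB_of_ge f n y (x + y) hyn]
        simp only [List.not_mem_nil, or_false, List.mem_cons]
        constructor
        · rintro (rfl | rfl)
          · rfl
          · omega
        · rintro rfl
          exact Or.inl rfl
    · rw [genB, if_neg hxn, genA]
      have hyn : ¬ y < n := by omega
      rw [if_neg hyn]
      simp only [List.not_mem_nil, or_false]
      constructor
      · rintro (rfl | rfl) <;> omega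
      · intro h; exact absurd h (by simp)

theorem charLe_iff (a b : Char) : a ≤ b ↔ a.toNat ≤ b.toNat := by
  rw [Char.le_def]; exact UInt32.le_iff_toNat_le

theorem toNat_ofNat_small (n : Nat) (h : n < 55296) : (Char.ofNat n).toNat = n := by
  have hv : n.isValidChar := Or.inl h
  simp only [Char.ofNat, dif_pos hv]
  exact UInt32.toNat_ofNatLT

theorem isalpha_upperChar (c : Char) : PySem.Chars.isalpha (PySem.Chars.upperChar c) = PySem.Chars.isalpha c := by
  simp only [PySem.Chars.isalpha, PySem.Chars.upperChar, PySem.Chars.islower, PySem.Chars.isupper]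
  by_cases h : 'a' ≤ c ∧ c ≤ 'z'
  · have hn := (charLe_iff 'a' c).mp h.1
    have hn2 := (charLe_iff c 'z').mp h.2
    have ha : ('a' : Char).toNat = 97 := rfl
    have hz : ('z' : Char).toNat = 122 := rfl
    rw [ha] at hn; rw [hz] at hn2
    have hval : (Char.ofNat (c.toNat - 32)).toNat = c.toNat - 32 := toNat_ofNat_small _ (by omega)
    simp only [h.1, h.2, decide_true, Bool.and_self, if_pos]
    simp only [charLe_iff, hval]
    have : ('A' : Char).toNat = 65 := rfl
    have : ('Z' : Char).toNat = 90 := rfl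
    simp_all [charLe_iff]
    omega
  · have : ¬ ((decide ('a' ≤ c) && decide (c ≤ 'z')) = true) := by
      simp only [Bool.and_eq_true, decide_eq_true_eq]; tauto
    simp only [if_neg this]

theorem upperChar_upperChar (c : Char) : PySem.Chars.upperChar (PySem.Chars.upperChar c) = PySem.Chars.upperChar c := by
  simp only [PySem.Chars.upperChar, PySem.Chars.islower]
  by_cases h : 'a' ≤ c ∧ c ≤ 'z'
  · have hn := (charLe_iff 'a' c).mp h.1
    have hn2 := (charLe_iff c 'z').mp h.2
    have ha : ('a' : Char).toNat = 97 := rfl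
    have hz : ('z' : Char).toNat = 122 := rfl
    rw [ha] at hn; rw [hz] at hn2
    have hval : (Char.ofNat (c.toNat - 32)).toNat = c.toNat - 32 := toNat_ofNat_small _ (by omega)
    simp only [h.1, h.2, decide_true, Bool.and_self, if_pos]
    have : ¬ ('a' ≤ Char.ofNat (c.toNat - 32) ∧ Char.ofNat (c.toNat - 32) ≤ 'z') := by
      rw [charLe_iff, charLe_iff, hval, ha, hz]; omega
    have h2 : ¬ ((decide ('a' ≤ Char.ofNat (c.toNat - 32)) && decide (Char.ofNat (c.toNat - 32) ≤ 'z')) = true) := by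
      simp only [Bool.and_eq_true, decide_eq_true_eq]; tauto
    simp only [if_neg h2]
  · have h2 : ¬ ((decide ('a' ≤ c) && decide (c ≤ 'z')) = true) := by
      simp only [Bool.and_eq_true, decide_eq_true_eq]; tauto
    simp only [if_neg h2]

theorem length_bloopB (fuel : Nat) (n : Int) :
    ∀ (a b : Int) (chars : List Char), (bloopB fuel n a b chars).length = chars.length := by
  induction fuel with
  | zero => intro a b chars; rfl
  | succ f ih =>
    intro a b chars
    rw [bloopB]
    by_cases h : a < n
    · simp only [if_pos h, ih]
      split <;> simp [PySem.List.length_pySetD]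
    · simp [if_neg h]

theorem bloopB_getElem (fuel : Nat) (n : Int) :
    ∀ (a b : Int) (chars : List Char), 0 ≤ a → 0 ≤ b → n = (chars.length : Int) →
      ∀ (j : Nat) (hj : j < chars.length),
        (bloopB fuel n a b chars)[j]? =
          some (if (j : Int) ∈ genB fuel n a b ∧ PySem.Chars.isalpha chars[j] then PySem.Chars.upperChar chars[j] else chars[j]) := by
  induction fuel with
  | zero =>
    intro a b chars ha hb hn j hj
    simp [bloopB, genB, List.getElem?_eq_getElem hj]
  | succ f ih =>
    intro a b chars ha hb hn j hj
    rw [bloopB, genB]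
    by_cases h : a < n
    · simp only [if_pos h]
      have haN : a.toNat < chars.length := by omega
      have haI : ((a.toNat : Nat) : Int) = a := by omega
      have hget : PySem.List.pyGetD chars a ' ' = chars[a.toNat] := by
        rw [PySem.List.pyGetD_eq_getElem _ _ ha (by omega)]
      set c := PySem.List.pyGetD chars a ' ' with hc
      by_cases halpha : PySem.Chars.isalpha c = true
      · simp only [if_pos halpha]
        have hset : PySem.List.pySetD chars a (PySem.Chars.upperChar c) = chars.set a.toNat (PySem.Chars.upperChar c) := by
          rw [PySem.List.pySetD_of_nonneg (h := ha)]
        rw [hset]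
        have hlen : n = (((chars.set a.toNat (PySem.Chars.upperChar c)).length : Nat) : Int) := by
          simpa using hn
        have hrec := ih b (a + b) (chars.set a.toNat (PySem.Chars.upperChar c)) hb (by omega) hlen j (by simpa using hj)
        rw [hrec]
        by_cases hja : j = a.toNat
        · subst hja
          congr 1
          have hmem2 : ((a.toNat : Nat) : Int) ∈ a :: genB f n b (a + b) := by
            rw [haI]; exact List.mem_cons_self
          simp only [List.getElem_set_self, isalpha_upperChar, upperChar_upperChar, ← hget, halpha,
            and_true, hmem2, if_pos]
          by_cases hm : ((a.toNat : Nat) : Int) ∈ genB f n b (a + b) <;> simp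
        · congr 1
          have hne : ¬ ((j : Int) = a) := by omega
          simp only [List.getElem_set_ne (show a.toNat ≠ j from fun hq => hja hq.symm),
            List.mem_cons, hne, false_or]
      · simp only [if_neg halpha]
        have hrec := ih b (a + b) chars hb (by omega) hn j hj
        rw [hrec]
        congr 1
        by_cases hja : j = a.toNat
        · subst hja
          rw [hget] at halpha
          simp [halpha]
        · have hne : ¬ ((j : Int) = a) := by omega
          simp only [List.mem_cons, hne, false_or]
    · simp [if_neg h, List.getElem?_eq_getElem hj]

theorem capitalize_fibonacci_spec' (s : String) : capitalize_fibonacci s = capitalize_fibonacci_alt s := by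
  unfold capitalize_fibonacci capitalize_fibonacci_alt
  set sl : List Char := PySem.Chars.lower s.toList with hsl
  simp only []
  congr 1
  -- rewrite A's foldl into a map
  have hbody : (fun (acc : List Char) (i : Int) =>
      if PySem.Chars.isalpha (PySem.List.pyGetD sl i ' ') && PySem.Set.contains (PySem.Set.ofList (fibLoopA (sl.length + 1) (sl.length : Int) [0, 1])) i
      then acc ++ [PySem.Chars.upperChar (PySem.List.pyGetD sl i ' ')] else acc ++ [PySem.List.pyGetD sl i ' '])
      = (fun (acc : List Char) (i : Int) => acc ++ [
          if PySem.Chars.isalpha (PySem.List.pyGetD sl i ' ') && PySem.Set.contains (PySem.Set.ofList (fibLoopA (sl.length + 1) (sl.length : Int) [0, 1])) i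
          then PySem.Chars.upperChar (PySem.List.pyGetD sl i ' ') else PySem.List.pyGetD sl i ' ']) := by
    funext acc i
    split <;> rfl
  rw [hbody, PySem.List.foldl_append_singleton_eq_map]
  apply List.ext_getElem?
  intro j
  by_cases hj : j < sl.length
  · have hA := PySem.List.getElem?_map_pyRange_zero
      (fun i =>
        if PySem.Chars.isalpha (PySem.List.pyGetD sl i ' ') && PySem.Set.contains (PySem.Set.ofList (fibLoopA (sl.length + 1) (sl.length : Int) [0, 1])) i
        then PySem.Chars.upperChar (PySem.List.pyGetD sl i ' ') else PySem.List.pyGetD sl i ' ') sl.length j hj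
    have hB := bloopB_getElem (sl.length + 1) (sl.length : Int) 0 1 sl (le_refl 0) (by omega) rfl j hj
    simp only [List.nil_append] at *
    rw [hA, hB]
    congr 1
    have hget : PySem.List.pyGetD sl ((j : Nat) : Int) ' ' = sl[j] := by
      rw [PySem.List.pyGetD_eq_getElem _ _ (by omega) (by simpa using hj)]
      simp
    have hfibo : fibLoopA (sl.length + 1) (sl.length : Int) [0, 1] = [0, 1] ++ genA (sl.length + 1) (sl.length : Int) 0 1 := by
      have := fibLoopA_eq_genA (sl.length + 1) (sl.length : Int) [] 0 1
      simpa using this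
    have hiff : (((j : Nat) : Int) ∈ PySem.Set.ofList (fibLoopA (sl.length + 1) (sl.length : Int) [0, 1]))
        ↔ (((j : Nat) : Int) ∈ genB (sl.length + 1) (sl.length : Int) 0 1) := by
      rw [PySem.Set.mem_ofList, hfibo]
      have hmain := mem_genA_iff_genB (sl.length + 1) (sl.length : Int) 0 1 ((j : Nat) : Int)
        (le_refl 0) (by omega) (by omega) (by omega) (by omega) (by omega) (by exact_mod_cast hj)
      simp only [List.mem_append, List.mem_cons, List.not_mem_nil, or_false] at *
      tauto
    have hmem : PySem.Set.contains (PySem.Set.ofList (fibLoopA (sl.length + 1) (sl.length : Int) [0, 1])) ((j : Nat) : Int)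
        = decide (((j : Nat) : Int) ∈ genB (sl.length + 1) (sl.length : Int) 0 1) := by
      rw [Bool.eq_iff_iff]
      simp only [PySem.Set.contains_iff, decide_eq_true_eq]
      exact hiff
    rw [hget, hmem]
    by_cases hmB : ((j : Nat) : Int) ∈ genB (sl.length + 1) (sl.length : Int) 0 1
      <;> by_cases hal : PySem.Chars.isalpha sl[j] = true <;> simp [hmB, hal]
  · rw [List.getElem?_eq_none (by simp; omega),
        List.getElem?_eq_none (by rw [length_bloopB]; omega)]

-- ===== VERDICT (by name: the statement is the Claim_ definition above) =====
theorem capitalize_fibonacci_spec : Claim_equal_capitalize_fibonacci := by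
  intro s _
  exact capitalize_fibonacci_spec' s
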